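-- pv_equiv track=rewrite | github.com/0x17io/python_des_implementation | des.py | convert_to_64bit_blocks
-- ===== SOURCE A (Python) =====
-- def convert_to_64bit_blocks(message):
--     """
--     Returns blocks of 64 bits, padding of 0s if message length is not divisible by 64.
--     :param message: Text message.
--     :return: Array of 64 bit elements.
--     """
--     bits_of_64_conversion = [ord(c) for c in message]
--     bits_of_64_conversion = [bin(num)[2:].zfill(8) for num in bits_of_64_conversion]
--     bits_of_64_conversion = ''.join(bits_of_64_conversion)
--
--     needed_bits = 64 - (len(bits_of_64_conversion) % 64)
--
--     # Converting to list, since operations are more intuitive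
--     convert_2_list = list(bits_of_64_conversion)
--     convert_2_list.extend(['0'] * needed_bits)
--
--     bits_of_64_conversion = ''.join(convert_2_list)
--
--     return [bits_of_64_conversion[i:i+64] for i in range(0, len(bits_of_64_conversion), 64)]
-- ===== SOURCE B (Python) =====
-- def convert_to_64bit_blocks(message):
--     """Single streaming pass: append each char's 8-bit code to a buffer,
--     flush a 64-bit block whenever the buffer fills, then zero-pad the
--     remainder into one final block."""
--     blocks = []
--     buf = ''
--     for c in message:
--         buf += format(ord(c), 'b').zfill(8)
--         if len(buf) >= 64:
--             blocks.append(buf[:64])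
--             buf = buf[64:]
--     blocks.append(buf + '0' * (64 - len(buf)))
--     return blocks
-- ===== Notes on version B (the rewrite author's own statement) =====
-- stated objective: alternative
-- what changed: B replaces A's multi-pass pipeline (build the whole bit string, join, compute padding, re-join, then slice it into 64-char pieces by index arithmetic) with a single streaming pass that keeps a partial-block buffer, flushes a 64-bit block whenever it fills, and zero-pads the remainder into the final block.
import Mathlib
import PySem

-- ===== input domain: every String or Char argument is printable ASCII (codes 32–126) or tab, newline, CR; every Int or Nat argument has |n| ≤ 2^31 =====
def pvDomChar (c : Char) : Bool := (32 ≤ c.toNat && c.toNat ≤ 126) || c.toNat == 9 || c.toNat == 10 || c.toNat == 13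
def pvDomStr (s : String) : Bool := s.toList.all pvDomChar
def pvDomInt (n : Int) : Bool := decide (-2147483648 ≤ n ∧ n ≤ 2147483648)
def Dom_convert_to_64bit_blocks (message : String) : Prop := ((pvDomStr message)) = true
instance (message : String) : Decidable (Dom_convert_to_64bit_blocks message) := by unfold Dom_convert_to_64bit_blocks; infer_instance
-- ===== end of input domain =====

-- B replaces A's build-whole-bitstring-then-slice pipeline by a single streaming pass with a
-- partial-block buffer (alternative decomposition, same cost).

-- ===== PORT A =====
def convert_to_64bit_blocks (message : String) : List String :=
  let nums : List Int := message.toList.map (fun c => (c.toNat : Int))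
  let bin8 : List (List Char) :=
    nums.map (fun n => PySem.Chars.zfill (PySem.List.slice (PySem.Int.toBinChars0b n) (some 2) none) 8)
  let bits : List Char := PySem.Chars.join [] bin8
  let needed : Int := 64 - PySem.Int.mod (bits.length : Int) 64
  let padded : List Char := bits ++ List.replicate needed.toNat '0'
  (PySem.List.pyRange 0 (padded.length : Int) 64).map
    (fun i => String.ofList (PySem.List.slice padded (some i) (some (i + 64))))

-- ===== PORT B =====
-- format(ord(c), 'b').zfill(8)
def pvEnc (c : Char) : List Char := PySem.Chars.zfill (PySem.Int.toBinChars (c.toNat : Int)) 8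

def pvStep (st : List String × List Char) (c : Char) : List String × List Char :=
  let buf := st.2 ++ pvEnc c
  if 64 ≤ buf.length then (st.1 ++ [String.ofList (buf.take 64)], buf.drop 64)
  else (st.1, buf)

def convert_to_64bit_blocks_alt (message : String) : List String :=
  let r := message.toList.foldl pvStep ([], [])
  r.1 ++ [String.ofList (r.2 ++ List.replicate (64 - r.2.length) '0')]

-- ===== PRECONDITION & SPEC =====
def Spec_convert_to_64bit_blocks (message : String) (out : List String) : Prop := out = convert_to_64bit_blocks_alt message
instance (message : String) (out : List String) : Decidable (Spec_convert_to_64bit_blocks message out) := by unfold Spec_convert_to_64bit_blocks; infer_instance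

-- ===== CLAIM (what is proved, stated in full; the proofs are below) =====
def Claim_equal_convert_to_64bit_blocks : Prop := ∀ (message : String), Dom_convert_to_64bit_blocks message → Spec_convert_to_64bit_blocks message (convert_to_64bit_blocks message)

-- ===== LEMMAS AND PROOFS =====

-- Unrolled form of B: process the chars against a partial-block buffer, pad at the end.
def pvF (buf : List Char) : List Char → List String
  | [] => [String.ofList (buf ++ List.replicate (64 - buf.length) '0')]
  | c :: cs =>
    let b := buf ++ pvEnc c
    if 64 ≤ b.length then String.ofList (b.take 64) :: pvF (b.drop 64) cs
    else pvF b cs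

-- 64-character chunks of a list, front to back.
def pvChunks (s : List Char) : List String :=
  if s = [] then []
  else String.ofList (s.take 64) :: pvChunks (s.drop 64)
  termination_by s.length
  decreasing_by
    rename_i h
    have : s.length ≠ 0 := fun h0 => h (List.eq_nil_of_length_eq_zero h0)
    simp [List.length_drop]; omega

theorem pvF_foldl (cs : List Char) (blocks : List String) (buf : List Char) :
    (let r := cs.foldl pvStep (blocks, buf)
     r.1 ++ [String.ofList (r.2 ++ List.replicate (64 - r.2.length) '0')]) = blocks ++ pvF buf cs := by
  induction cs generalizing blocks buf with
  | nil => simp [pvF]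
  | cons c cs ih =>
    simp only [List.foldl_cons, pvStep, pvF]
    split
    · rw [ih]; simp
    · rw [ih]

theorem pvChunks_append (x r : List Char) (hx : x.length = 64) :
    pvChunks (x ++ r) = String.ofList x :: pvChunks r := by
  have hne : x ++ r ≠ [] := by
    intro h
    have : (x ++ r).length = 0 := by rw [h]; rfl
    simp [hx] at this
  rw [pvChunks, if_neg hne, List.take_left' hx, List.drop_left' hx]

theorem pvChunks_of_len64 (x : List Char) (hx : x.length = 64) :
    pvChunks x = [String.ofList x] := by
  have h := pvChunks_append x [] hx
  rw [List.append_nil] at h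
  rw [h, pvChunks]
  simp

theorem pvEnc_len (c : Char) (h : pvDomChar c = true) : (pvEnc c).length = 8 := by
  have hc : c.toNat < 256 := by
    simp [pvDomChar] at h; omega
  have hlen : (PySem.Int.toBinChars (c.toNat : Int)).length ≤ 8 := by
    have h2 : ¬ ((c.toNat : Int) < 0) := by omega
    simp only [PySem.Int.toBinChars, if_neg h2, Int.toNat_natCast]
    exact (Nat.length_toDigits_le_iff (by norm_num) (by norm_num)).mpr (by omega)
  simp [pvEnc, PySem.Chars.length_zfill]
  omega

-- The main invariant: chunking the padded bitstring from a partial buffer equals the streaming pass.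
theorem pvChunks_eq_pvF (l : List Char) (buf : List Char)
    (hl : ∀ c ∈ l, (pvEnc c).length = 8) (hb : buf.length ≤ 56) (hd : 8 ∣ buf.length) :
    pvChunks (buf ++ (l.map pvEnc).flatten ++
      List.replicate (64 - (buf ++ (l.map pvEnc).flatten).length % 64) '0') = pvF buf l := by
  induction l generalizing buf with
  | nil =>
    have hmod : buf.length % 64 = buf.length := Nat.mod_eq_of_lt (by omega)
    rw [pvF]
    simp only [List.map_nil, List.flatten_nil, List.append_nil, hmod]
    exact pvChunks_of_len64 _ (by simp; omega)
  | cons c cs ih =>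
    have hec : (pvEnc c).length = 8 := hl c (List.mem_cons_self ..)
    have hcs : ∀ x ∈ cs, (pvEnc x).length = 8 := fun x hx => hl x (List.mem_cons_of_mem _ hx)
    rw [pvF]
    by_cases hflush : 64 ≤ (buf ++ pvEnc c).length
    · -- buffer fills exactly: buf.length = 56
      have h56 : buf.length = 56 := by simp at hflush; omega
      have hb64 : (buf ++ pvEnc c).length = 64 := by simp; omega
      have hdrop : (buf ++ pvEnc c).drop 64 = [] := by
        apply List.eq_nil_of_length_eq_zero; simp; omega
      have htake : (buf ++ pvEnc c).take 64 = buf ++ pvEnc c := by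
        rw [List.take_of_length_le (by omega)]
      rw [if_pos hflush, htake, hdrop]
      have := ih [] hcs (by simp) (by simp)
      simp only [List.nil_append] at this
      rw [← this]
      have hassoc : buf ++ (pvEnc c :: cs.map pvEnc).flatten = (buf ++ pvEnc c) ++ (cs.map pvEnc).flatten := by
        simp
      simp only [List.map_cons, hassoc]
      have hmod : ((buf ++ pvEnc c) ++ (cs.map pvEnc).flatten).length % 64
          = ((cs.map pvEnc).flatten).length % 64 := by
        rw [List.length_append, hb64]; omega
      rw [hmod, List.append_assoc]
      exact pvChunks_append _ _ hb64
    · -- buffer still partial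
      have hlt : buf.length + 8 < 64 := by simp [hec] at hflush; omega
      rw [if_neg hflush]
      have := ih (buf ++ pvEnc c) hcs (by simp; omega) (by simp [hec]; omega)
      rw [← this]
      simp [List.append_assoc]
-- (counts agree: both replicate counts are over the same total length)

theorem pvSliceMap_eq_pvChunks (m : Nat) (s : List Char) (hs : s.length = 64 * m) :
    (List.range m).map (fun k => String.ofList ((s.drop (64 * k)).take 64)) = pvChunks s := by
  induction m generalizing s with
  | zero =>
    have h0 : s = [] := List.eq_nil_of_length_eq_zero (by omega)
    rw [h0, pvChunks]
    simp
  | succ m ih =>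
    have hne : s ≠ [] := by
      intro h; rw [h] at hs; simp at hs
    rw [List.range_succ_eq_map, List.map_cons, List.map_map]
    rw [pvChunks, if_neg hne]
    congr 1
    rw [← ih (s.drop 64) (by simp [hs]; omega)]
    apply List.map_congr_left
    intro k _
    simp [List.drop_drop, Nat.succ_eq_add_one]
    congr 3
    omega

theorem pvA_range (s : List Char) (m : Nat) (hs : s.length = 64 * m) :
    (PySem.List.pyRange 0 (s.length : Int) 64).map
      (fun i => String.ofList (PySem.List.slice s (some i) (some (i + 64)))) = pvChunks s := by
  rw [PySem.List.pyRange_of_pos 0 (s.length : Int) (by norm_num), List.map_map]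
  have hcnt : (if (0:Int) < (s.length : Int) then (((s.length : Int) - 0 + 64 - 1) / 64).toNat else 0) = m := by
    split
    · rw [hs]; push_cast; omega
    · omega
  rw [hcnt, ← pvSliceMap_eq_pvChunks m s hs]
  apply List.map_congr_left
  intro k _
  simp only [Function.comp_apply, zero_add]
  have : (64 : Int) * (k : Int) = ((64 * k : Nat) : Int) := by push_cast; ring
  rw [this]
  have h64 : ((64 * k : Nat) : Int) + 64 = ((64 * k : Nat) : Int) + ((64 : Nat) : Int) := by norm_num
  rw [h64, PySem.List.slice_natCast_add]

theorem pvIntercalate_nil (xs : List (List Char)) : PySem.Chars.join [] xs = xs.flatten := by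
  induction xs with
  | nil => rfl
  | cons x xs ih =>
    cases xs with
    | nil => simp [PySem.Chars.join, List.intercalate]
    | cons y ys =>
      simp only [PySem.Chars.join, List.intercalate, List.intersperse] at *
      simpa using ih

theorem pvEncA (c : Char) :
    PySem.Chars.zfill (PySem.List.slice (PySem.Int.toBinChars0b (c.toNat : Int)) (some 2) none) 8
      = pvEnc c := by
  have h2 : ¬ ((c.toNat : Int) < 0) := by omega
  have : PySem.List.slice (PySem.Int.toBinChars0b (c.toNat : Int)) (some 2) none
      = PySem.Int.toBinChars (c.toNat : Int) := by
    rw [show (2:Int) = ((2:Nat):Int) from rfl, PySem.List.slice_from_natCast]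
    simp only [PySem.Int.toBinChars0b, PySem.Int.toBinChars, if_neg h2]
    rfl
  rw [this, pvEnc]

-- ===== VERDICT (by name: the statement is the Claim_ definition above) =====
theorem convert_to_64bit_blocks_spec : Claim_equal_convert_to_64bit_blocks := by
  intro message hdom
  unfold Spec_convert_to_64bit_blocks
  have hall : ∀ c ∈ message.toList, pvDomChar c = true := by
    have := hdom
    unfold Dom_convert_to_64bit_blocks pvDomStr at this
    exact fun c hc => List.all_eq_true.mp this c hc
  have henc : ∀ c ∈ message.toList, (pvEnc c).length = 8 := fun c hc => pvEnc_len c (hall c hc)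
  -- B's side
  have hB : convert_to_64bit_blocks_alt message = pvF [] message.toList := by
    unfold convert_to_64bit_blocks_alt
    have := pvF_foldl message.toList [] []
    simpa using this
  -- A's side
  unfold convert_to_64bit_blocks
  simp only [List.map_map]
  rw [show (fun n => PySem.Chars.zfill (PySem.List.slice (PySem.Int.toBinChars0b n) (some 2) none) 8) ∘
        (fun c : Char => ((c.toNat : Int))) = pvEnc from funext fun c => pvEncA c]
  rw [pvIntercalate_nil]
  set bits := (message.toList.map pvEnc).flatten with hbits
  set L := bits.length with hL
  have hmod : PySem.Int.mod (L : Int) 64 = ((L % 64 : Nat) : Int) := by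
    exact_mod_cast PySem.Int.mod_natCast L 64
  have hneed : ((64 : Int) - PySem.Int.mod (L : Int) 64).toNat = 64 - L % 64 := by
    rw [hmod]
    have : L % 64 < 64 := Nat.mod_lt _ (by norm_num)
    omega
  rw [hneed]
  have hlen : (bits ++ List.replicate (64 - L % 64) '0').length = 64 * (L / 64 + 1) := by
    have : L % 64 < 64 := Nat.mod_lt _ (by norm_num)
    simp [← hL]
    omega
  rw [pvA_range _ _ hlen, hB]
  have h2 := pvChunks_eq_pvF message.toList [] henc (by simp) (by simp)
  simp only [List.nil_append] at h2
  rw [← hbits, ← hL] at h2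
  exact h2
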